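-- pv_equiv track=rewrite | github.com/jeromedockes/skrub | skrub/_transformed_data.py | _pick_names
-- ===== SOURCE A (Python) =====
-- import itertools
--
-- def _pick_names(suggested_names):
--     used = set()
--     new_names = []
--     for name in suggested_names:
--         suffixes = map("_{}".format, itertools.count(1))
--         new = name
--         while new in used:
--             new = f"{name}{next(suffixes)}"
--         used.add(new)
--         new_names.append(new)
--     return new_names
-- ===== SOURCE B (Python) =====
-- def _pick_names(suggested_names):
--     # dict-as-ordered-set of taken names + memoized next suffix index per base name;
--     # single fold over the input, each base's suffix search resumes where it stopped.
--     taken = {}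
--     next_k = {}
--     result = []
--     for name in suggested_names:
--         if name in taken:
--             k = next_k.get(name, 1)
--             while f"{name}_{k}" in taken:
--                 k += 1
--             next_k[name] = k + 1
--             name = f"{name}_{k}"
--         taken[name] = None
--         result.append(name)
--     return result
-- ===== Notes on version B (the rewrite author's own statement) =====
-- stated objective: faster
-- what changed: B replaces A's set plus rescan-suffixes-from-1 inner loop by a dict of taken names together with a per-base-name memo of the next suffix index to try, so repeated base names resume their search instead of rescanning; ported as a single foldl over a (taken, next_k, result) triple instead of A's explicit recursion.
import Mathlib
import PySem

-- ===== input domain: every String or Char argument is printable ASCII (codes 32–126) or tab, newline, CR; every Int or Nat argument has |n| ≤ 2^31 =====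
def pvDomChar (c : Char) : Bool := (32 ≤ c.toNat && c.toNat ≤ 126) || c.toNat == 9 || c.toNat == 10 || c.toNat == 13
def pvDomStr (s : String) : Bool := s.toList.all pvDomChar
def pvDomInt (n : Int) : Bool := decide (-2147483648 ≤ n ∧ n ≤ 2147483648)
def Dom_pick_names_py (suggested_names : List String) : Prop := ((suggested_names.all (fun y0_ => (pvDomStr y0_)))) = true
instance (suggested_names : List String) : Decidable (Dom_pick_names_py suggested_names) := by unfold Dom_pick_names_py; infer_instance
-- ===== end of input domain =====

-- B keeps a dict of taken names and a per-base-name memo of the next suffix index to try,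
-- resuming each base's search instead of rescanning suffixes from 1 as A does; objective:
-- faster (asymptotic on duplicate-heavy input).  A's unbounded while-loop is ported with fuel
-- used.length + 1 (the pigeonhole lemma below proves it sufficient), B's with size + 1 likewise.

-- ===== PORT A =====
-- f"{name}{suffix}" with suffix = "_{}".format(k); str(k) for a Nat k is Nat.repr k
def pvSfx (name : String) (k : Nat) : String := name ++ "_" ++ Nat.repr k

-- the 'while new in used' loop of A, fuel-bounded
def pvAWhile (used : PySem.Set String) (name new : String) (k fuel : Nat) : String :=
  match fuel with
  | 0 => new
  | fuel + 1 => if new ∈ used then pvAWhile used name (pvSfx name k) (k + 1) fuel else new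

-- the 'for name in suggested_names' loop of A: state = (used, new_names)
def pvAGo : List String → PySem.Set String → List String → List String
  | [], _, acc => acc
  | name :: rest, used, acc =>
    let new := pvAWhile used name name 1 (used.length + 1)
    pvAGo rest (PySem.Set.add used new) (acc ++ [new])

def pick_names_py (suggested_names : List String) : List String :=
  pvAGo suggested_names PySem.Set.empty []

-- ===== PORT B =====
-- B's 'while f"{name}_{k}" in taken: k += 1' loop, returning the final k
def pvBScan (taken : PySem.Dict String Unit) (name : String) (k fuel : Nat) : Nat :=
  match fuel with
  | 0 => k
  | fuel + 1 => if taken.contains (pvSfx name k) then pvBScan taken name (k + 1) fuel else k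

-- one iteration of B's for-loop, as a step function on the state (taken, next_k, result)
def pvBStep (st : PySem.Dict String Unit × PySem.Dict String Nat × List String) (name : String) :
    PySem.Dict String Unit × PySem.Dict String Nat × List String :=
  if st.1.contains name then
    let k := pvBScan st.1 name (st.2.1.getD name 1) (st.1.size + 1)
    (st.1.insert (pvSfx name k) (), st.2.1.insert name (k + 1), st.2.2 ++ [pvSfx name k])
  else
    (st.1.insert name (), st.2.1, st.2.2 ++ [name])

def pick_names_py_alt (suggested_names : List String) : List String :=
  (suggested_names.foldl pvBStep (PySem.Dict.empty, PySem.Dict.empty, [])).2.2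

-- ===== PRECONDITION & SPEC =====
def Spec_pick_names_py (suggested_names : List String) (out : List String) : Prop := out = pick_names_py_alt suggested_names
instance (suggested_names : List String) (out : List String) : Decidable (Spec_pick_names_py suggested_names out) := by unfold Spec_pick_names_py; infer_instance

-- ===== CLAIM (what is proved, stated in full; the proofs are below) =====
def Claim_equal_pick_names_py : Prop := ∀ (suggested_names : List String), Dom_pick_names_py suggested_names → Spec_pick_names_py suggested_names (pick_names_py suggested_names)

-- ===== LEMMAS AND PROOFS =====

-- decimal value of a digit list, to invert Nat.repr (injectivity of str(k))
def pvDVal (c : Char) : Nat := c.toNat - 48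
def pvVal (l : List Char) : Nat := l.foldl (fun a c => 10 * a + pvDVal c) 0

theorem pvVal_go (l : List Char) (a : Nat) :
    l.foldl (fun a c => 10 * a + pvDVal c) a = a * 10 ^ l.length + pvVal l := by
  induction l generalizing a with
  | nil => simp [pvVal]
  | cons c l ih =>
    simp only [List.foldl_cons, List.length_cons, pvVal]
    rw [ih, ih (10 * 0 + pvDVal c), pow_succ]
    ring

theorem pvVal_cons (c : Char) (l : List Char) :
    pvVal (c :: l) = pvDVal c * 10 ^ l.length + pvVal l := by
  simpa [pvVal] using pvVal_go l (10 * 0 + pvDVal c)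

theorem pvDVal_digitChar (d : Nat) (h : d < 10) : pvDVal (Nat.digitChar d) = d := by
  interval_cases d <;> decide

theorem pvVal_toDigitsCore : ∀ (fuel n : Nat) (ds : List Char), n < 10 ^ fuel →
    pvVal (Nat.toDigitsCore 10 fuel n ds) = n * 10 ^ ds.length + pvVal ds := by
  intro fuel
  induction fuel with
  | zero =>
    intro n ds h
    interval_cases n
    simp [Nat.toDigitsCore]
  | succ f ih =>
    intro n ds h
    rw [Nat.toDigitsCore]
    by_cases h0 : n / 10 = 0
    · have hn : n < 10 := by omega
      rw [if_pos h0, pvVal_cons, pvDVal_digitChar _ (Nat.mod_lt _ (by norm_num)),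
        Nat.mod_eq_of_lt hn]
    · rw [if_neg h0, ih _ _ (Nat.div_lt_of_lt_mul (by rw [pow_succ'] at h; exact h))]
      rw [pvVal_cons, pvDVal_digitChar _ (Nat.mod_lt _ (by norm_num))]
      have hd := Nat.div_add_mod n 10
      have hn : n * 10 ^ ds.length = (10 * (n / 10) + n % 10) * 10 ^ ds.length := by rw [hd]
      rw [List.length_cons, pow_succ, hn]
      ring

theorem pvVal_repr (n : Nat) : pvVal (Nat.repr n).toList = n := by
  have hb : n < 10 ^ (n + 1) :=
    lt_of_lt_of_le (Nat.lt_pow_self (by norm_num)) (Nat.pow_le_pow_right (by norm_num) (Nat.le_succ n))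
  have := pvVal_toDigitsCore (n + 1) n [] hb
  simpa [Nat.repr, Nat.toDigits, pvVal] using this

theorem pvRepr_inj {m n : Nat} (h : Nat.repr m = Nat.repr n) : m = n := by
  have := congrArg (fun s => pvVal s.toList) h
  simpa [pvVal_repr] using this

theorem pvSfx_inj (name : String) {k1 k2 : Nat} (h : pvSfx name k1 = pvSfx name k2) : k1 = k2 := by
  have h' := congrArg String.toList h
  simp only [pvSfx, String.toList_append, List.append_assoc] at h'
  have h2 := List.append_cancel_left h'
  have h3 := List.append_cancel_left h2
  exact pvRepr_inj (String.toList_inj.mp h3)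

theorem pvSfx_ne_name (name : String) (k : Nat) : name ≠ pvSfx name k := by
  intro h
  have := congrArg (fun s => s.toList.length) h
  simp [pvSfx, String.toList_append] at this

-- pigeonhole: some suffix index in [1, used.length] is free once name itself is taken
theorem pvExists_free (used : PySem.Set String) (name : String)
    (hmem : name ∈ used) : ∃ j, (1 ≤ j ∧ pvSfx name j ∉ used) ∧ j ≤ used.length := by
  by_contra hc
  push Not at hc
  have hall : ∀ j, 1 ≤ j → j ≤ used.length → pvSfx name j ∈ used := by
    intro j h1 h2
    by_contra hje
    exact absurd (hc j ⟨h1, hje⟩) (by omega)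
  have hsub : (name :: (List.range' 1 used.length).map (pvSfx name)) ⊆ used := by
    intro x hx
    rcases List.mem_cons.mp hx with h | h
    · exact h ▸ hmem
    · rcases List.mem_map.mp h with ⟨j, hj, rfl⟩
      rcases List.mem_range'_1.mp hj with ⟨h1, h2⟩
      exact hall j h1 (by omega)
  have hndl : (name :: (List.range' 1 used.length).map (pvSfx name)).Nodup := by
    refine List.nodup_cons.mpr ⟨?_, ?_⟩
    · intro h
      rcases List.mem_map.mp h with ⟨j, _, hj⟩
      exact pvSfx_ne_name name j hj.symm
    · exact List.Nodup.map (fun a b h => pvSfx_inj name h) List.nodup_range'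
  have := (List.subperm_of_subset hndl hsub).length_le
  simp at this

theorem pvAWhile_eq (used : PySem.Set String) (name : String) (L : Nat)
    (hL : pvSfx name L ∉ used) :
    ∀ (fuel k : Nat), k ≤ L → L - k < fuel →
      (∀ j, k ≤ j → j < L → pvSfx name j ∈ used) →
      pvAWhile used name (pvSfx name k) (k + 1) fuel = pvSfx name L := by
  intro fuel
  induction fuel with
  | zero => omega
  | succ f ih =>
    intro k hk hfuel hbusy
    rw [pvAWhile]
    by_cases hmem : pvSfx name k ∈ used
    · have hkL : k < L := by
        rcases Nat.lt_or_ge k L with h | h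
        · exact h
        · exact absurd (((Nat.le_antisymm hk h) ▸ hmem)) hL
      rw [if_pos hmem]
      exact ih (k + 1) (by omega) (by omega) (fun j hj hjL => hbusy j (by omega) hjL)
    · rw [if_neg hmem]
      by_cases he : k = L
      · rw [he]
      · exact absurd (hbusy k le_rfl (by omega)) hmem

theorem pvBScan_eq (taken : PySem.Dict String Unit) (name : String) (L : Nat)
    (hL : pvSfx name L ∉ taken.keys) :
    ∀ (fuel k : Nat), k ≤ L → L - k < fuel →
      (∀ j, k ≤ j → j < L → pvSfx name j ∈ taken.keys) →
      pvBScan taken name k fuel = L := by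
  intro fuel
  induction fuel with
  | zero => omega
  | succ f ih =>
    intro k hk hfuel hbusy
    rw [pvBScan, PySem.Dict.contains_eq_decide_mem_keys]
    by_cases hmem : pvSfx name k ∈ taken.keys
    · have hkL : k < L := by
        rcases Nat.lt_or_ge k L with h | h
        · exact h
        · exact absurd (((Nat.le_antisymm hk h) ▸ hmem)) hL
      rw [if_pos (by simpa using hmem)]
      exact ih (k + 1) (by omega) (by omega) (fun j hj hjL => hbusy j (by omega) hjL)
    · rw [if_neg (by simpa using hmem)]
      by_cases he : k = L
      · exact he
      · exact absurd (hbusy k le_rfl (by omega)) hmem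

-- memo invariant: every suffix index below the memoized next-to-try index is already taken
def pvInv (taken : PySem.Dict String Unit) (nk : PySem.Dict String Nat) : Prop :=
  ∀ b : String, 1 ≤ nk.getD b 1 ∧
    ∀ j, 1 ≤ j → j < nk.getD b 1 → pvSfx b j ∈ taken.keys

theorem pvSize_eq_keys_length (taken : PySem.Dict String Unit) :
    taken.size = taken.keys.length := by
  simp [PySem.Dict.size, PySem.Dict.keys]

theorem pvGo_eq : ∀ (names : List String) (taken : PySem.Dict String Unit)
    (nk : PySem.Dict String Nat) (acc : List String),
    pvInv taken nk →
    pvAGo names taken.keys acc = (names.foldl pvBStep (taken, nk, acc)).2.2 := by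
  intro names
  induction names with
  | nil => intro taken nk acc _; rfl
  | cons name rest ih =>
    intro taken nk acc hinv
    rw [pvAGo, List.foldl_cons]
    by_cases hmem : name ∈ taken.keys
    · have hcont : taken.contains name = true := by
        rw [PySem.Dict.contains_eq_decide_mem_keys]; exact decide_eq_true hmem
      -- the least free suffix index
      obtain ⟨j0, hj0, hj0le⟩ := pvExists_free taken.keys name hmem
      have hex : ∃ j, 1 ≤ j ∧ pvSfx name j ∉ taken.keys := ⟨j0, hj0⟩
      set L := Nat.find hex with hLdef
      have hLspec := Nat.find_spec hex
      have hLle : L ≤ taken.keys.length := le_trans (Nat.find_le hj0) hj0le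
      have hbusy : ∀ j, 1 ≤ j → j < L → pvSfx name j ∈ taken.keys := by
        intro j h1 hj
        by_contra hjn
        exact Nat.find_min hex hj ⟨h1, hjn⟩
      -- A's loop result
      have hA : pvAWhile taken.keys name name 1 (taken.keys.length + 1) = pvSfx name L := by
        rw [pvAWhile, if_pos hmem]
        have hm1 : 1 ≤ taken.keys.length := List.length_pos_of_mem hmem
        exact pvAWhile_eq taken.keys name L hLspec.2 taken.keys.length 1 hLspec.1
          (by omega) (fun j hj hjL => hbusy j hj hjL)
      -- B's step
      have hk0 := (hinv name).1
      have hk0L : nk.getD name 1 ≤ L := by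
        by_contra hc
        exact hLspec.2 ((hinv name).2 L hLspec.1 (by omega))
      have hB : pvBScan taken name (nk.getD name 1) (taken.size + 1) = L := by
        rw [pvSize_eq_keys_length]
        exact pvBScan_eq taken name L hLspec.2 (taken.keys.length + 1) _ hk0L (by omega)
          (fun j hj hjL => hbusy j (by omega) hjL)
      have hncont : taken.contains (pvSfx name L) = false := by
        rw [PySem.Dict.contains_eq_decide_mem_keys]; exact decide_eq_false hLspec.2
      have hstep : pvBStep (taken, nk, acc) name =
          (taken.insert (pvSfx name L) (), nk.insert name (L + 1), acc ++ [pvSfx name L]) := by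
        simp [pvBStep, hcont, hB]
      have hkeys : (taken.insert (pvSfx name L) ()).keys = taken.keys ++ [pvSfx name L] :=
        PySem.Dict.keys_insert_of_not_contains taken () hncont
      have hadd : PySem.Set.add taken.keys (pvSfx name L) = taken.keys ++ [pvSfx name L] :=
        PySem.Set.add_of_not_mem hLspec.2
      rw [hA, hstep, hadd, ← hkeys]
      apply ih
      intro b
      by_cases hb : b = name
      · subst hb
        rw [PySem.Dict.getD_insert_self]
        refine ⟨by omega, fun j h1 hj => ?_⟩
        rw [hkeys, List.mem_append]
        by_cases hjL : j = L
        · exact Or.inr (by simp [hjL, hLdef])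
        · exact Or.inl (hbusy j h1 (by omega))
      · have hgd : (nk.insert name (L + 1)).getD b 1 = nk.getD b 1 := by
          rw [PySem.Dict.getD, PySem.Dict.get?_insert_of_ne _ _ hb, ← PySem.Dict.getD]
        rw [hgd]
        refine ⟨(hinv b).1, fun j h1 hj => ?_⟩
        rw [hkeys, List.mem_append]
        exact Or.inl ((hinv b).2 j h1 hj)
    · have hcont : taken.contains name = false := by
        rw [PySem.Dict.contains_eq_decide_mem_keys]; exact decide_eq_false hmem
      have hA : pvAWhile taken.keys name name 1 (taken.keys.length + 1) = name := by
        rw [pvAWhile, if_neg hmem]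
      have hstep : pvBStep (taken, nk, acc) name =
          (taken.insert name (), nk, acc ++ [name]) := by
        simp [pvBStep, hcont]
      have hkeys : (taken.insert name ()).keys = taken.keys ++ [name] :=
        PySem.Dict.keys_insert_of_not_contains taken () hcont
      have hadd : PySem.Set.add taken.keys name = taken.keys ++ [name] :=
        PySem.Set.add_of_not_mem hmem
      rw [hA, hstep, hadd, ← hkeys]
      apply ih
      intro b
      refine ⟨(hinv b).1, fun j h1 hj => ?_⟩
      rw [hkeys, List.mem_append]
      exact Or.inl ((hinv b).2 j h1 hj)

-- ===== VERDICT (by name: the statement is the Claim_ definition above) =====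
theorem pick_names_py_spec : Claim_equal_pick_names_py := by
  intro names _
  unfold Spec_pick_names_py pick_names_py pick_names_py_alt
  have h0 : (PySem.Dict.empty : PySem.Dict String Unit).keys = PySem.Set.empty := rfl
  rw [← h0]
  apply pvGo_eq
  intro b
  have h1 : (PySem.Dict.empty : PySem.Dict String Nat).getD b 1 = 1 :=
    PySem.Dict.getD_of_get?_eq_none _ _ (PySem.Dict.get?_empty _)
  exact ⟨by omega, fun j hj hlt => by omega⟩
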